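-- pv_equiv track=rewrite | github.com/joaoviitorsx/apuradorICMS-Flet | src/Utils/validadores.py | formatarValorInput
-- ===== SOURCE A (Python) =====
-- def formatarValorInput(value):
--         cleaned = ''.join(c for c in value if c.isdigit() or c in '.,')
--
--         if ',' in cleaned:
--             parts = cleaned.split(',')
--             if len(parts) > 2:
--                 cleaned = parts[0] + ',' + ''.join(parts[1:])
--             if len(parts) == 2 and len(parts[1]) > 2:
--                 cleaned = parts[0] + ',' + parts[1][:2]
--
--         return cleaned
-- ===== SOURCE B (Python) =====
-- def formatarValorInput(value):
--     # single pass state machine: no filtered copy, no split/find/replace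
--     head = []
--     tail = []
--     commas = 0
--     for c in value:
--         if c == ',':
--             commas += 1
--         elif c.isdigit() or c == '.':
--             (tail if commas else head).append(c)
--     if commas == 0:
--         return ''.join(head)
--     if commas == 1:
--         tail = tail[:2]
--     return ''.join(head) + ',' + ''.join(tail)
-- ===== Notes on version B (the rewrite author's own statement) =====
-- stated objective: alternative
-- what changed: Replaces A's staged passes (build a filtered copy, split it at commas into a parts list, branch on the part count) with a single pass over the raw string driven by a small state machine that routes each kept character into a head or tail accumulator while counting commas, assembling the result once at the end.
import Mathlib
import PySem

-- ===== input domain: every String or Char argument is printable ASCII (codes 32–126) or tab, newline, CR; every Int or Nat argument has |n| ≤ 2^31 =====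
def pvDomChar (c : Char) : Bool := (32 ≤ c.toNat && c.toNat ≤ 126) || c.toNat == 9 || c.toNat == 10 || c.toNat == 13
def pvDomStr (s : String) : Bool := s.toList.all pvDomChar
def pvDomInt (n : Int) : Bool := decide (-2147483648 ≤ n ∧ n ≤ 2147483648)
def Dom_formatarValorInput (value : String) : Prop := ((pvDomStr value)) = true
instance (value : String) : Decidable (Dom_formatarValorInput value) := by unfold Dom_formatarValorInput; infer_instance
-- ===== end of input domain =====

-- B replaces A's staged passes (filter to a cleaned copy, split on ',', branch on the part
-- count) by ONE pass over the raw string with an accumulator (head / tail / comma counter);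
-- objective: simpler.

-- ===== PORT A =====
-- ''.join over the single filtered characters is the filtered character list (exact);
-- parts[0] / parts[1] are read through pyGet?;  .getD [] is never taken: split always
-- returns a nonempty list, and parts[1] is read only under len(parts) == 2.
def formatarValorInput (value : String) : String :=
  let cleaned := value.toList.filter (fun ch => PySem.Chars.isdigit ch || PySem.Chars.isIn [ch] ['.', ','])
  let cleaned :=
    if PySem.Chars.isIn [','] cleaned then
      let parts := PySem.Chars.splitOn cleaned [',']
      let cleaned1 :=
        if 2 < parts.length then
          ((PySem.List.pyGet? parts 0).getD []) ++ ',' :: PySem.Chars.join [] (PySem.List.slice parts (some 1) none)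
        else cleaned
      if parts.length = 2 ∧ 2 < ((PySem.List.pyGet? parts 1).getD []).length then
        ((PySem.List.pyGet? parts 0).getD []) ++ ',' :: PySem.List.slice ((PySem.List.pyGet? parts 1).getD []) none (some 2)
      else cleaned1
    else cleaned
  String.ofList cleaned

-- ===== PORT B =====
-- one fold over the characters carrying (head, tail, commas); list append mirrors
-- Python's .append on the chosen accumulator; tail[:2] is PySem.List.slice.
def formatarValorInput_alt (value : String) : String :=
  let st := value.toList.foldl
    (fun (st : List Char × List Char × Nat) c =>
      if c = ',' then (st.1, st.2.1, st.2.2 + 1)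
      else if PySem.Chars.isdigit c || c = '.' then
        if st.2.2 ≠ 0 then (st.1, st.2.1 ++ [c], st.2.2) else (st.1 ++ [c], st.2.1, st.2.2)
      else st)
    ([], [], 0)
  if st.2.2 = 0 then String.ofList st.1
  else
    let tail := if st.2.2 = 1 then PySem.List.slice st.2.1 none (some 2) else st.2.1
    String.ofList (st.1 ++ ',' :: tail)

-- ===== PRECONDITION & SPEC =====
def Spec_formatarValorInput (value : String) (out : String) : Prop := out = formatarValorInput_alt value
instance (value : String) (out : String) : Decidable (Spec_formatarValorInput value out) := by unfold Spec_formatarValorInput; infer_instance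

-- ===== CLAIM (what is proved, stated in full; the proofs are below) =====
def Claim_equal_formatarValorInput : Prop := ∀ (value : String), Dom_formatarValorInput value → Spec_formatarValorInput value (formatarValorInput value)

-- ===== LEMMAS AND PROOFS =====

-- the fold step of port B, named for the lemmas
def pvStep (st : List Char × List Char × Nat) (c : Char) : List Char × List Char × Nat :=
  if c = ',' then (st.1, st.2.1, st.2.2 + 1)
  else if PySem.Chars.isdigit c || c = '.' then
    if st.2.2 ≠ 0 then (st.1, st.2.1 ++ [c], st.2.2) else (st.1 ++ [c], st.2.1, st.2.2)
  else st

-- digit-or-dot filter (tail side / comma-free head side)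
def pvFilt (l : List Char) : List Char := l.filter (fun c => PySem.Chars.isdigit c || c = '.')

theorem pv_fold_pos (l : List Char) : ∀ (h t : List Char) (k : Nat), k ≠ 0 →
    l.foldl pvStep (h, t, k) = (h, t ++ pvFilt l, k + l.count ',') := by
  induction l with
  | nil => intro h t k hk; simp [pvFilt]
  | cons c r ih =>
    intro h t k hk
    rw [List.foldl_cons]
    by_cases hc : c = ','
    · subst hc
      rw [show pvStep (h, t, k) ',' = (h, t, k + 1) from by simp [pvStep],
        ih h t (k+1) (by omega),
        show pvFilt (',' :: r) = pvFilt r from List.filter_cons_of_neg (by decide),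
        List.count_cons_self]
      refine Prod.ext rfl (Prod.ext rfl ?_)
      simp
      omega
    · by_cases hd : (PySem.Chars.isdigit c || c = '.') = true
      · rw [show pvStep (h, t, k) c = (h, t ++ [c], k) from by simp [pvStep, hc, hd, hk],
          ih h (t ++ [c]) k hk]
        simp [pvFilt, List.filter_cons, hd, List.count_cons, hc]
      · rw [show pvStep (h, t, k) c = (h, t, k) from by simp [pvStep, hc, hd],
          ih h t k hk]
        simp [pvFilt, List.filter_cons, hd, List.count_cons, hc]

theorem pv_fold_zero (l : List Char) (hnc : ',' ∉ l) : ∀ (h t : List Char),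
    l.foldl pvStep (h, t, 0) = (h ++ pvFilt l, t, 0) := by
  induction l with
  | nil => intro h t; simp [pvFilt]
  | cons c r ih =>
    intro h t
    have hc : ¬ c = ',' := by rintro rfl; exact hnc List.mem_cons_self
    rw [List.foldl_cons]
    by_cases hd : (PySem.Chars.isdigit c || c = '.') = true
    · rw [show pvStep (h, t, 0) c = (h ++ [c], t, 0) from by simp [pvStep, hc, hd],
        ih (fun hm => hnc (List.mem_cons_of_mem _ hm)) (h ++ [c]) t]
      simp [pvFilt, List.filter_cons, hd]
    · rw [show pvStep (h, t, 0) c = (h, t, 0) from by simp [pvStep, hc, hd],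
        ih (fun hm => hnc (List.mem_cons_of_mem _ hm)) h t]
      simp [pvFilt, List.filter_cons, hd]

-- A's filter predicate agrees with pvFilt's on non-comma characters
theorem pv_predA (c : Char) :
    (PySem.Chars.isdigit c || PySem.Chars.isIn [c] ['.', ',']) =
      (PySem.Chars.isdigit c || c = '.' || c = ',') := by
  have : PySem.Chars.isIn [c] ['.', ','] = (c = '.' || c = ',') := by
    by_cases h1 : c = '.'
    · subst h1; decide
    · by_cases h2 : c = ','
      · subst h2; decide
      · have : PySem.Chars.isIn [c] ['.', ','] = false := by
          rw [PySem.Chars.isIn_eq_false_iff]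
          intro hinf
          have := hinf.subset (List.mem_singleton_self c)
          simp at this
          rcases this with h | h
          · exact h1 (by simp [h])
          · exact h2 (by simp [h])
        simp [this, h1, h2]
  rw [this, Bool.or_assoc]

theorem pv_isIn_char (c : Char) (l : List Char) :
    PySem.Chars.isIn [c] l = l.contains c := by
  by_cases h : c ∈ l
  · have h1 : PySem.Chars.isIn [c] l = true := by
      rw [PySem.Chars.isIn_iff_infix]
      obtain ⟨l1, l2, rfl⟩ := List.append_of_mem h
      exact ⟨l1, l2, by simp⟩
    rw [h1, List.contains_eq_mem, decide_eq_true h]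
  · have h1 : PySem.Chars.isIn [c] l = false := by
      rw [PySem.Chars.isIn_eq_false_iff]
      intro hinf
      exact h (hinf.subset (by simp))
    rw [h1, List.contains_eq_mem, decide_eq_false h]

theorem pv_modifyHead_id {α : Type} (l : List α) : List.modifyHead (fun x => x) l = l := by
  cases l <;> simp

def splitC (c : Char) : List Char → List (List Char)
  | [] => [[]]
  | d :: t => if d = c then [] :: splitC c t else (splitC c t).modifyHead (d :: ·)

theorem splitC_ne_nil (c : Char) (l : List Char) : splitC c l ≠ [] := by
  induction l with
  | nil => simp [splitC]
  | cons d t ih =>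
    simp only [splitC]
    split
    · simp
    · intro h; exact ih (by simpa using List.modifyHead_eq_nil_iff.mp h)

theorem pv_splitOn_go_eq (c : Char) : ∀ (l : List Char) (fuel : Nat) (cur : List Char)
    (acc : List (List Char)), l.length ≤ fuel →
    PySem.Chars.splitOn.go [c] fuel l cur acc
      = acc.reverse ++ (splitC c l).modifyHead (cur.reverse ++ ·) := by
  intro l
  induction l with
  | nil => intro fuel cur acc h; cases fuel <;> simp [PySem.Chars.splitOn.go, splitC]
  | cons d t ih =>
    intro fuel cur acc h
    cases fuel with
    | zero => simp at h
    | succ f =>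
      by_cases hd : c = d
      · subst hd
        simp only [PySem.Chars.splitOn.go, List.isPrefixOf, beq_self_eq_true, Bool.true_and,
          if_true, List.length_singleton, List.drop_succ_cons, List.drop_zero]
        rw [ih f [] (cur.reverse :: acc) (by simpa using h)]
        simp [splitC, pv_modifyHead_id]
      · have hb : (c == d) = false := by simp [hd]
        simp only [PySem.Chars.splitOn.go, List.isPrefixOf, hb, Bool.false_and]
        rw [ih f (d :: cur) acc (by simpa using h)]
        have := splitC_ne_nil c t
        simp only [splitC, if_neg (Ne.symm hd)]
        cases hsp : splitC c t with
        | nil => exact absurd hsp this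
        | cons p r => simp

theorem pv_splitOn_eq_splitC (c : Char) (l : List Char) :
    PySem.Chars.splitOn l [c] = splitC c l := by
  have := pv_splitOn_go_eq c l (l.length + 1) [] [] (by omega)
  simpa [PySem.Chars.splitOn, pv_modifyHead_id] using this

theorem splitC_no (c : Char) (l : List Char) (h : c ∉ l) : splitC c l = [l] := by
  induction l with
  | nil => simp [splitC]
  | cons d t ih =>
    have : ¬ d = c := by rintro rfl; exact h List.mem_cons_self
    simp [splitC, this, ih (fun hm => h (List.mem_cons_of_mem _ hm))]

theorem splitC_first (c : Char) (pre rest : List Char) (h : c ∉ pre) :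
    splitC c (pre ++ c :: rest) = pre :: splitC c rest := by
  induction pre with
  | nil => simp [splitC]
  | cons d t ih =>
    have hd : ¬ d = c := by rintro rfl; exact h List.mem_cons_self
    simp [splitC, hd, ih (fun hm => h (List.mem_cons_of_mem _ hm))]

theorem splitC_flatten (c : Char) (l : List Char) :
    (splitC c l).flatten = l.filter (· != c) := by
  induction l with
  | nil => simp [splitC]
  | cons d t ih =>
    by_cases hd : d = c
    · subst hd; simp [splitC, ih]
    · have hdc : (d != c) = true := by simp [hd]
      cases hsp : splitC c t with
      | nil => exact absurd hsp (splitC_ne_nil c t)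
      | cons p r =>
        simp [splitC, hd, hsp, List.filter, hdc]
        rw [← ih, hsp]; simp

theorem splitC_length (c : Char) (l : List Char) :
    (splitC c l).length = l.count c + 1 := by
  induction l with
  | nil => simp [splitC]
  | cons d t ih =>
    by_cases hd : d = c
    · subst hd; simp [splitC, ih, List.count_cons]
    · simp [splitC, hd, List.count_cons] at *
      omega

theorem pv_join_nil_eq (ps : List (List Char)) : PySem.Chars.join [] ps = ps.flatten := by
  simp [PySem.Chars.join]
  induction ps with
  | nil => simp [List.intercalate]
  | cons p r ih => simp [List.intercalate] at *; cases r <;> simp_all [List.intercalate]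

-- on a comma-free list A's filter is pvFilt, and the filter keeps every comma
theorem pv_filterA_no_comma (l : List Char) (h : ',' ∉ l) :
    l.filter (fun ch => PySem.Chars.isdigit ch || PySem.Chars.isIn [ch] ['.', ',']) = pvFilt l := by
  unfold pvFilt
  apply List.filter_congr
  intro c hc
  rw [pv_predA]
  have : ¬ c = ',' := by rintro rfl; exact h hc
  simp [this]


-- count of a kept character is unchanged by A's filter
theorem pv_count_filterA (l : List Char) :
    (l.filter (fun ch => PySem.Chars.isdigit ch || PySem.Chars.isIn [ch] ['.', ','])).count ','
      = l.count ',' := by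
  induction l with
  | nil => rfl
  | cons c r ih =>
    simp only [List.filter_cons]
    by_cases hp : (PySem.Chars.isdigit c || PySem.Chars.isIn [c] ['.', ',']) = true
    · rw [if_pos hp]
      simp [List.count_cons, ih]
    · have hc : ¬ c = ',' := by
        rintro rfl
        exact hp (by decide)
      rw [if_neg hp]
      simp [List.count_cons, ih, hc]

-- removing the commas from A's filtered list gives pvFilt
theorem pv_filterA_drop_comma (l : List Char) :
    (l.filter (fun ch => PySem.Chars.isdigit ch || PySem.Chars.isIn [ch] ['.', ','])).filter (· != ',')
      = pvFilt l := by
  rw [List.filter_filter]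
  unfold pvFilt
  apply List.filter_congr
  intro c _
  rw [pv_predA]
  by_cases hc : c = ','
  · subst hc; decide
  · simp [hc]

theorem pv_comma_not_mem_pvFilt (l : List Char) : ',' ∉ pvFilt l := by
  intro h
  have := List.of_mem_filter h
  exact absurd this (by decide)

-- the main agreement, stated over the raw character list
theorem pv_main (cs : List Char) :
    String.ofList
      (let cleaned := cs.filter (fun ch => PySem.Chars.isdigit ch || PySem.Chars.isIn [ch] ['.', ','])
       if PySem.Chars.isIn [','] cleaned then
        let parts := PySem.Chars.splitOn cleaned [',']
        let cleaned1 :=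
          if 2 < parts.length then
            ((PySem.List.pyGet? parts 0).getD []) ++ ',' :: PySem.Chars.join [] (PySem.List.slice parts (some 1) none)
          else cleaned
        if parts.length = 2 ∧ 2 < ((PySem.List.pyGet? parts 1).getD []).length then
          ((PySem.List.pyGet? parts 0).getD []) ++ ',' :: PySem.List.slice ((PySem.List.pyGet? parts 1).getD []) none (some 2)
        else cleaned1
       else cleaned)
    =
    (let st := cs.foldl pvStep ([], [], 0)
     if st.2.2 = 0 then String.ofList st.1
     else
      let tail := if st.2.2 = 1 then PySem.List.slice st.2.1 none (some 2) else st.2.1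
      String.ofList (st.1 ++ ',' :: tail)) := by
  by_cases hmem : ',' ∈ cs
  · -- decompose cs at its first comma
    obtain ⟨pre, rest, hcs, hpre⟩ : ∃ pre rest, cs = pre ++ ',' :: rest ∧ ',' ∉ pre := by
      cases hdw : cs.dropWhile (· != ',') with
      | nil =>
        have := List.dropWhile_eq_nil_iff.mp hdw ',' hmem
        simp at this
      | cons d t =>
        have hne : cs.dropWhile (· != ',') ≠ [] := by rw [hdw]; simp
        have hd : d = ',' := by
          have h := List.head_dropWhile_not (· != ',') hne
          simp [hdw] at h
          exact h
        refine ⟨cs.takeWhile (· != ','), t, ?_, ?_⟩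
        · conv_lhs => rw [← List.takeWhile_append_dropWhile (p := (· != ',')) (l := cs)]
          rw [hdw, hd]
        · intro hm
          have := List.mem_takeWhile_imp hm
          simp at this
    subst hcs
    -- B's fold over pre ++ ',' :: rest
    have hfold : (pre ++ ',' :: rest).foldl pvStep ([], [], 0)
        = (pvFilt pre, pvFilt rest, 1 + rest.count ',') := by
      rw [List.foldl_append, pv_fold_zero pre hpre [] [], List.foldl_cons, List.nil_append]
      rw [show pvStep (pvFilt pre, [], 0) ',' = (pvFilt pre, [], 1) from by simp [pvStep],
        pv_fold_pos rest (pvFilt pre) [] 1 (by omega)]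
      simp
    -- A's filtered list
    have hcleaned : (pre ++ ',' :: rest).filter
        (fun ch => PySem.Chars.isdigit ch || PySem.Chars.isIn [ch] ['.', ','])
        = pvFilt pre ++ ',' :: rest.filter (fun ch => PySem.Chars.isdigit ch || PySem.Chars.isIn [ch] ['.', ',']) := by
      rw [List.filter_append, List.filter_cons_of_pos (by decide), pv_filterA_no_comma pre hpre]
    set R : List Char := rest.filter (fun ch => PySem.Chars.isdigit ch || PySem.Chars.isIn [ch] ['.', ',']) with hR
    have hRcount : R.count ',' = rest.count ',' := pv_count_filterA rest
    have hIn : PySem.Chars.isIn [','] (pvFilt pre ++ ',' :: R) = true := by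
      rw [pv_isIn_char, List.contains_eq_mem, decide_eq_true (by simp)]
    have hparts : PySem.Chars.splitOn (pvFilt pre ++ ',' :: R) [','] = pvFilt pre :: splitC ',' R :=
      (pv_splitOn_eq_splitC ',' _).trans (splitC_first ',' (pvFilt pre) R (pv_comma_not_mem_pvFilt pre))
    have hL : (pvFilt pre :: splitC ',' R).length = 2 + rest.count ',' := by
      simp [splitC_length, hRcount]
      omega
    simp only [hcleaned, hfold, hIn, if_pos rfl, hparts]
    by_cases hr : ',' ∈ rest
    · -- at least two commas: A merges parts[1:], B has been appending to tail past every comma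
      have hrc : 1 ≤ rest.count ',' := List.one_le_count_iff.mpr hr
      have hA2 : ¬((pvFilt pre :: splitC ',' R).length = 2 ∧
          2 < ((PySem.List.pyGet? (pvFilt pre :: splitC ',' R) 1).getD []).length) := by
        rintro ⟨hc, -⟩
        rw [hL] at hc
        omega
      have hA1 : 2 < (pvFilt pre :: splitC ',' R).length := by rw [hL]; omega
      rw [if_neg hA2, if_pos hA1,
          if_neg (show ¬(1 + rest.count ',' = 0) by omega),
          if_neg (show ¬(1 + rest.count ',' = 1) by omega)]
      simp only [PySem.List.slice_from_one, List.tail_cons, pv_join_nil_eq, splitC_flatten]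
      rw [hR, pv_filterA_drop_comma]
      simp [PySem.List.pyGet?, PySem.List.pyIdx?]
    · -- exactly one comma
      have hr0 : rest.count ',' = 0 := List.count_eq_zero.mpr hr
      have hRnc : ',' ∉ R := fun h => hr (List.mem_of_mem_filter h)
      have hRfilt : R = pvFilt rest := hR.trans (pv_filterA_no_comma rest hr)
      have hsp : splitC ',' R = [R] := splitC_no ',' R hRnc
      rw [if_neg (show ¬(1 + rest.count ',' = 0) by omega),
          if_pos (show 1 + rest.count ',' = 1 by omega)]
      simp only [hsp]
      have hget1 : (PySem.List.pyGet? [pvFilt pre, R] 1).getD [] = R := by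
        simp [PySem.List.pyGet?, PySem.List.pyIdx?]
      have hget0 : (PySem.List.pyGet? [pvFilt pre, R] 0).getD [] = pvFilt pre := by
        simp [PySem.List.pyGet?, PySem.List.pyIdx?]
      by_cases hlen2 : 2 < R.length
      · rw [if_pos (show ([pvFilt pre, R].length = 2 ∧
              2 < ((PySem.List.pyGet? [pvFilt pre, R] 1).getD []).length) from
              ⟨rfl, by rw [hget1]; exact hlen2⟩), hget0, hget1, hRfilt]
        simp
      · rw [if_neg (show ¬([pvFilt pre, R].length = 2 ∧
              2 < ((PySem.List.pyGet? [pvFilt pre, R] 1).getD []).length) from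
              fun hc => hlen2 (by rw [← hget1]; exact hc.2)),
            if_neg (show ¬(2 < ([pvFilt pre, R] : List (List Char)).length) from by simp)]
        have : PySem.List.slice (pvFilt rest) none (some 2) = pvFilt rest := by
          rw [PySem.List.slice_to _ (by norm_num), List.take_of_length_le]
          rw [← hRfilt]; omega
        rw [this, hRfilt]
        simp
  · -- no comma: both return the filtered string unchanged
    have hnc : PySem.Chars.isIn [','] (pvFilt cs) = false := by
      rw [pv_isIn_char, List.contains_eq_mem, decide_eq_false]
      intro h
      exact hmem (List.mem_of_mem_filter h)
    have hfold : cs.foldl pvStep ([], [], 0) = (pvFilt cs, [], 0) := pv_fold_zero cs hmem [] []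
    simp only [pv_filterA_no_comma cs hmem, hnc, Bool.false_eq_true, if_false, hfold]
    simp

-- ===== VERDICT (by name: the statement is the Claim_ definition above) =====
theorem formatarValorInput_spec : Claim_equal_formatarValorInput := by
  intro value _
  unfold Spec_formatarValorInput formatarValorInput formatarValorInput_alt
  exact pv_main value.toList
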